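-- pv_equiv track=rewrite | github.com/jeonghyoan/Capstone-Design | flask_app/classification_module.py | DealWithHashtag
-- ===== SOURCE A (Python) =====
-- def DealWithHashtag(arr):
--     result = []
--     current_concatenated = ''
--     for item in arr:
--         if item.startswith('#'):
--             current_concatenated += item
--         else:
--             if current_concatenated:
--                 result.append(current_concatenated)
--                 current_concatenated = ''
--             result.append(item)
--     if current_concatenated:
--         result.append(current_concatenated)
--
--     return result
-- ===== SOURCE B (Python) =====
-- from itertools import groupby
--
-- def DealWithHashtag(arr):
--     result = []
--     for is_hash, group in groupby(arr, key=lambda x: x.startswith('#')):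
--         if is_hash:
--             result.append(''.join(group))
--         else:
--             result.extend(group)
--     return result
-- ===== Notes on version B (the rewrite author's own statement) =====
-- stated objective: idiomatic
-- what changed: Replaced the explicit accumulator/flush state machine with an itertools.groupby pass that splits the list into maximal runs by startswith('#') and joins each hashtag run in one step.
import Mathlib
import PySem

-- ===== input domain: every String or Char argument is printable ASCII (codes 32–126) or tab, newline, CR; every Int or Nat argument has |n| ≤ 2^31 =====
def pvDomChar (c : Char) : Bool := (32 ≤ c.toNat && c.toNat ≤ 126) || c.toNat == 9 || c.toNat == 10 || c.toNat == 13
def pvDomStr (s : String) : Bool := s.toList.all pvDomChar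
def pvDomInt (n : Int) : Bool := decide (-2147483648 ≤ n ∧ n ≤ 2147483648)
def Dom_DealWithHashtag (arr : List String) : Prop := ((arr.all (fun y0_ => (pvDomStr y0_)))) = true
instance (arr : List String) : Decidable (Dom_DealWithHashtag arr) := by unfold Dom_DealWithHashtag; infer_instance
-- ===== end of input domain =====

-- B replaces A's accumulator/flush state machine with a groupby-style pass over maximal runs (idiomatic; same cost).

-- ===== PORT A =====
-- loop state: (result, current_concatenated)
def pvStepA (st : List String × String) (item : String) : List String × String :=
  if PySem.Str.startswith item "#" then
    (st.1, st.2 ++ item)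
  else
    ((if st.2 ≠ "" then st.1 ++ [st.2] else st.1) ++ [item], "")

def DealWithHashtag (arr : List String) : List String :=
  let st := arr.foldl pvStepA ([], "")
  if st.2 ≠ "" then st.1 ++ [st.2] else st.1

-- ===== PORT B =====
def pvIsHash (s : String) : Bool := PySem.Str.startswith s "#"

-- groupby: peel off one maximal run at a time; a hashtag run is joined, others pass through
def DealWithHashtag_alt : List String → List String
  | [] => []
  | x :: xs =>
    if pvIsHash x then
      PySem.Str.join "" ((x :: xs).takeWhile pvIsHash) ::
        DealWithHashtag_alt ((x :: xs).dropWhile pvIsHash)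
    else
      x :: DealWithHashtag_alt xs
termination_by xs => xs.length
decreasing_by
  · simp only [List.dropWhile_cons, *, if_pos]
    have := List.length_dropWhile_le pvIsHash xs
    simp only [List.length_cons]; omega
  · simp

-- ===== PRECONDITION & SPEC =====
def Spec_DealWithHashtag (arr : List String) (out : List String) : Prop := out = DealWithHashtag_alt arr
instance (arr : List String) (out : List String) : Decidable (Spec_DealWithHashtag arr out) := by unfold Spec_DealWithHashtag; infer_instance

-- ===== CLAIM (what is proved, stated in full; the proofs are below) =====
def Claim_equal_DealWithHashtag : Prop := ∀ (arr : List String), Dom_DealWithHashtag arr → Spec_DealWithHashtag arr (DealWithHashtag arr)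

-- ===== LEMMAS AND PROOFS =====

-- finishing flush of A's loop
def pvFinishA (st : List String × String) : List String :=
  if st.2 ≠ "" then st.1 ++ [st.2] else st.1

theorem pvHash_ne_empty {s : String} (h : pvIsHash s = true) : s ≠ "" := by
  intro he; subst he; simp [pvIsHash, PySem.Str.startswith, PySem.Chars.startswith_iff] at h

theorem pvJoin0_cons (x : String) (g : List String) :
    PySem.Str.join "" (x :: g) = x ++ PySem.Str.join "" g := by
  apply String.ext
  cases g <;> simp [PySem.Str.join, PySem.Chars.join, List.intercalate]

theorem pvJoin0_nil : PySem.Str.join "" ([] : List String) = "" := by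
  apply String.ext
  simp [PySem.Str.join, PySem.Chars.join, List.intercalate]

theorem pvLoop_prepend (xs : List String) : ∀ (res : List String) (cur : String),
    xs.foldl pvStepA (res, cur) =
      (res ++ (xs.foldl pvStepA ([], cur)).1, (xs.foldl pvStepA ([], cur)).2) := by
  induction xs with
  | nil => intro res cur; simp
  | cons x xs ih =>
    intro res cur
    simp only [List.foldl_cons]
    by_cases hx : PySem.Str.startswith x "#"
    · simp only [pvStepA, hx, if_pos]
      exact ih res (cur ++ x)
    · simp only [pvStepA, hx, Bool.false_eq_true, if_false]
      by_cases hc : cur = ""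
      · subst hc
        simp only [ne_eq, not_true_eq_false, if_neg, not_false_eq_true,
          List.nil_append]
        rw [ih (res ++ [x]), ih [x]]
        simp
      · simp only [ne_eq, hc, not_false_eq_true, if_pos, List.nil_append]
        rw [ih (res ++ [cur] ++ [x]), ih ([cur] ++ [x])]
        simp
  -- note: restructure below if needed

theorem pvAppend_ne_empty' {a b : String} (h : b ≠ "") : a ++ b ≠ "" := by
  intro he
  have : (a ++ b).toList = [] := by simp [he]
  simp at this
  exact h this.2

theorem pvFinish_prepend (xs : List String) (res : List String) (cur : String) :
    pvFinishA (xs.foldl pvStepA (res, cur)) = res ++ pvFinishA (xs.foldl pvStepA ([], cur)) := by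
  rw [pvLoop_prepend xs res cur]
  unfold pvFinishA
  split <;> simp_all

theorem pvMain (xs : List String) : ∀ cur : String,
    pvFinishA (xs.foldl pvStepA ([], cur)) =
      if cur = "" then DealWithHashtag_alt xs
      else (cur ++ PySem.Str.join "" (xs.takeWhile pvIsHash)) ::
             DealWithHashtag_alt (xs.dropWhile pvIsHash) := by
  induction xs with
  | nil =>
    intro cur
    by_cases hc : cur = "" <;>
      simp [pvFinishA, hc, pvJoin0_nil, DealWithHashtag_alt]
  | cons x xs ih =>
    intro cur
    by_cases hx : pvIsHash x
    · have hx' : PySem.Str.startswith x "#" = true := hx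
      have hcx : cur ++ x ≠ "" := pvAppend_ne_empty' (pvHash_ne_empty hx)
      simp only [List.foldl_cons, pvStepA, hx', if_true]
      rw [ih (cur ++ x), if_neg hcx]
      have ht : List.takeWhile pvIsHash (x :: xs) = x :: List.takeWhile pvIsHash xs := by
        simp [hx]
      have hd : List.dropWhile pvIsHash (x :: xs) = List.dropWhile pvIsHash xs := by
        simp [hx]
      by_cases hc : cur = ""
      · rw [if_pos hc, DealWithHashtag_alt]
        rw [if_pos hx, ht, hd, pvJoin0_cons, hc]
        simp [String.empty_append]
      · rw [if_neg hc, ht, hd, pvJoin0_cons, String.append_assoc]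
    · have hx' : PySem.Str.startswith x "#" = false := by
        simpa [pvIsHash] using hx
      simp only [List.foldl_cons, pvStepA, hx', Bool.false_eq_true, if_false]
      rw [pvFinish_prepend, ih "", if_pos rfl]
      have ht : List.takeWhile pvIsHash (x :: xs) = [] := by
        simp [hx]
      have hd : List.dropWhile pvIsHash (x :: xs) = x :: xs := by
        simp [hx]
      by_cases hc : cur = ""
      · rw [if_pos hc, hc]
        rw [DealWithHashtag_alt]
        simp [hx]
      · rw [if_neg hc, ht, hd, pvJoin0_nil]
        rw [DealWithHashtag_alt]
        simp only [hx, Bool.false_eq_true, if_false]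
        simp [hc, String.append_empty]

-- ===== VERDICT (by name: the statement is the Claim_ definition above) =====
theorem DealWithHashtag_spec : Claim_equal_DealWithHashtag := by
  intro arr _
  show DealWithHashtag arr = DealWithHashtag_alt arr
  have := pvMain arr ""
  simpa [DealWithHashtag, pvFinishA] using this
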